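-- pv_equiv track=rewrite | github.com/dimitar-daskalov/SoftUni-Courses | python_advanced/labs_and_homeworks/03_multidimensional_lists_exercise/09_radioactive_mutant_vampire_bunnies.py | find_bunnies
-- ===== SOURCE A (Python) =====
-- def is_in_range(current_pos, row_received, col_received):
--     current_row_pos, current_col_pos = current_pos[0], current_pos[1]
--     if 0 <= current_row_pos < row_received and 0 <= current_col_pos < col_received:
--         return True
--     return False
--
-- def find_bunnies(row_received, col_received, changed_matrix):
--     bunny_positions = []
--     for row_index in range(row_received):
--         for col_index in range(col_received):
--             if changed_matrix[row_index][col_index] == "B":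
--                 bunny_positions.append((row_index, col_index))
--     for bunny_position in bunny_positions:
--         changed_matrix = bunnies_expand(bunny_position[0], bunny_position[1], changed_matrix, row_received, col_received)
--     return changed_matrix
--
-- def bunnies_expand(bunny_row, bunny_col, changed_matrix, row_received, col_received):
--     expand_positions = [
--         (bunny_row + 1, bunny_col),
--         (bunny_row - 1, bunny_col),
--         (bunny_row, bunny_col + 1),
--         (bunny_row, bunny_col - 1),
--         ]
--     for position in expand_positions:
--         if is_in_range(position, row_received, col_received) and changed_matrix[position[0]][position[1]] != "B":
--             changed_matrix[position[0]][position[1]] = "B"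
--
--     return changed_matrix
-- ===== SOURCE B (Python) =====
-- def find_bunnies(row_received, col_received, changed_matrix):
--     # Gather pass: snapshot the grid, then set each cell to "B" iff it or an
--     # in-range orthogonal neighbor holds "B" in the snapshot (in-place, like A).
--     snapshot = [row[:] for row in changed_matrix]
--
--     def has_bunny(r, c):
--         if snapshot[r][c] == "B":
--             return True
--         for nr, nc in ((r + 1, c), (r - 1, c), (r, c + 1), (r, c - 1)):
--             if 0 <= nr < row_received and 0 <= nc < col_received and snapshot[nr][nc] == "B":
--                 return True
--         return False
--
--     for r, row in enumerate(changed_matrix):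
--         for c in range(len(row)):
--             if r < row_received and c < col_received and has_bunny(r, c):
--                 row[c] = "B"
--     return changed_matrix
-- ===== Notes on version B (the rewrite author's own statement) =====
-- stated objective: alternative
-- what changed: Replaced A's two-phase scatter (collect all bunny positions, then write 'B' into each one's in-range neighbors) by a single gather pass that reads a snapshot and sets each cell to 'B' iff the cell or an in-range orthogonal neighbor holds 'B' in the snapshot.
import Mathlib
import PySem

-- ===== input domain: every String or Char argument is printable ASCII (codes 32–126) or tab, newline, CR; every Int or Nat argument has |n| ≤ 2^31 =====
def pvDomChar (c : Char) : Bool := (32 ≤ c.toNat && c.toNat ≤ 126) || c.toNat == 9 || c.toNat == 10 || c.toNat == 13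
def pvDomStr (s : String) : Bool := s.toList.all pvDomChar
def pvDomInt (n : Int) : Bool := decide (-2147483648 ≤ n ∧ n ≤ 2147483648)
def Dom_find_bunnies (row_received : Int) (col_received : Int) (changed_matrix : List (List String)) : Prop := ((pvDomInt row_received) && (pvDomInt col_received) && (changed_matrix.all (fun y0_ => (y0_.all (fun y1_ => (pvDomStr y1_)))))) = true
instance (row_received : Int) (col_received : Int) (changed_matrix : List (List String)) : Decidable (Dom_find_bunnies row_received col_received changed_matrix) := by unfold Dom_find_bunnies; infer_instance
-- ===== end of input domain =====

-- B replaces A's scatter from collected bunny positions by a single gather pass over the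
-- grid (alternative decomposition, same cost). Both Pythons mutate changed_matrix in place
-- the same way; the equivalence proved here is about the return value.

-- ===== PORT A =====
-- cell read m[i][j] / write m[i][j] = v; A indexes only at positions already checked
-- 0 ≤ i < row_received (≤ len on Pre_), so getD-based access is exact on Pre_.
def pvVal (m : List (List String)) (r c : Nat) : String := (m.getD r []).getD c ""
def pvGet (m : List (List String)) (i j : Int) : String := pvVal m i.toNat j.toNat
def pvSet (m : List (List String)) (i j : Int) (v : String) : List (List String) :=
  m.set i.toNat ((m.getD i.toNat []).set j.toNat v)

def is_in_range (current_pos : Int × Int) (row_received col_received : Int) : Bool :=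
  decide (0 ≤ current_pos.1 ∧ current_pos.1 < row_received) &&
  decide (0 ≤ current_pos.2 ∧ current_pos.2 < col_received)

-- one iteration of the loop body of bunnies_expand
def pvStep (row_received col_received : Int) (acc : List (List String)) (p : Int × Int) :
    List (List String) :=
  if is_in_range p row_received col_received && !(pvGet acc p.1 p.2 == "B") then
    pvSet acc p.1 p.2 "B"
  else acc

def pvExpandPositions (bunny_row bunny_col : Int) : List (Int × Int) :=
  [(bunny_row + 1, bunny_col), (bunny_row - 1, bunny_col),
   (bunny_row, bunny_col + 1), (bunny_row, bunny_col - 1)]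

def bunnies_expand (bunny_row bunny_col : Int) (changed_matrix : List (List String))
    (row_received col_received : Int) : List (List String) :=
  (pvExpandPositions bunny_row bunny_col).foldl (pvStep row_received col_received) changed_matrix

def find_bunnies (row_received : Int) (col_received : Int) (changed_matrix : List (List String)) : List (List String) :=
  let bunny_positions : List (Int × Int) :=
    (PySem.List.pyRange 0 row_received 1).foldl (fun acc row_index =>
      (PySem.List.pyRange 0 col_received 1).foldl (fun acc2 col_index =>
        if pvGet changed_matrix row_index col_index == "B" then acc2 ++ [(row_index, col_index)]
        else acc2) acc) []
  bunny_positions.foldl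
    (fun acc bunny_position =>
      bunnies_expand bunny_position.1 bunny_position.2 acc row_received col_received)
    changed_matrix

-- ===== PORT B =====
def pvHasBunny (snapshot : List (List String)) (row_received col_received : Int)
    (r c : Int) : Bool :=
  if pvGet snapshot r c == "B" then true
  else
    [(r + 1, c), (r - 1, c), (r, c + 1), (r, c - 1)].any (fun q =>
      decide (0 ≤ q.1 ∧ q.1 < row_received) && decide (0 ≤ q.2 ∧ q.2 < col_received) &&
      (pvGet snapshot q.1 q.2 == "B"))

-- B writes cell (r, c) of the matrix in place; immutably that is a mapIdx over rows and cells.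
def find_bunnies_alt (row_received : Int) (col_received : Int) (changed_matrix : List (List String)) : List (List String) :=
  let snapshot := changed_matrix
  changed_matrix.mapIdx (fun r row =>
    row.mapIdx (fun c v =>
      if decide ((r : Int) < row_received) && decide ((c : Int) < col_received) &&
          pvHasBunny snapshot row_received col_received (r : Int) (c : Int) then "B"
      else v))

-- ===== PRECONDITION & SPEC =====
-- Pre_ excludes exactly the inputs on which Python A raises IndexError: a positive scan
-- region that reaches past the actual rows of the matrix or past the end of a scanned row.
def Pre_find_bunnies (row_received : Int) (col_received : Int) (changed_matrix : List (List String)) : Prop :=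
  row_received ≤ 0 ∨ col_received ≤ 0 ∨
    (row_received ≤ (changed_matrix.length : Int) ∧
      ∀ row ∈ changed_matrix.take row_received.toNat, col_received ≤ (row.length : Int))
instance (row_received : Int) (col_received : Int) (changed_matrix : List (List String)) : Decidable (Pre_find_bunnies row_received col_received changed_matrix) := by unfold Pre_find_bunnies; infer_instance

def pvWitness_find_bunnies : Int × Int × List (List String) :=
  (2, 2, [["B", "."], [".", "."]])

def Spec_find_bunnies (row_received : Int) (col_received : Int) (changed_matrix : List (List String)) (out : List (List String)) : Prop := out = find_bunnies_alt row_received col_received changed_matrix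
instance (row_received : Int) (col_received : Int) (changed_matrix : List (List String)) (out : List (List String)) : Decidable (Spec_find_bunnies row_received col_received changed_matrix out) := by unfold Spec_find_bunnies; infer_instance

-- ===== CLAIM (what is proved, stated in full; the proofs are below) =====
def Claim_equal_find_bunnies : Prop := ∀ (row_received : Int) (col_received : Int) (changed_matrix : List (List String)), Dom_find_bunnies row_received col_received changed_matrix → Pre_find_bunnies row_received col_received changed_matrix → Spec_find_bunnies row_received col_received changed_matrix (find_bunnies row_received col_received changed_matrix)

-- ===== LEMMAS AND PROOFS =====

theorem pvStep_row_length (R C : Int) (a : List (List String)) (p : Int × Int) (r : Nat) :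
    ((pvStep R C a p).getD r []).length = (a.getD r []).length := by
  unfold pvStep pvSet
  split
  · by_cases h : p.1.toNat = r
    · subst h
      by_cases hl : p.1.toNat < a.length
      · simp [List.getD, List.getElem?_set, hl, List.getD_eq_getElem a [] hl]
      · simp [List.getD, List.getElem?_set, hl,
          List.getElem?_eq_none (by omega : a.length ≤ p.1.toNat)]
    · simp [List.getD, List.getElem?_set, h]
  · rfl

theorem pvStep_val (R C : Int) (a : List (List String)) (p : Int × Int) (r c : Nat) :
    pvVal (pvStep R C a p) r c =
      if is_in_range p R C = true ∧ p.1.toNat = r ∧ p.2.toNat = c ∧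
          r < a.length ∧ c < (a.getD r []).length then "B"
      else pvVal a r c := by
  unfold pvStep
  split
  case isTrue h =>
    simp only [Bool.and_eq_true, Bool.not_eq_true', beq_eq_false_iff_ne] at h
    obtain ⟨hin, hneq⟩ := h
    unfold pvSet pvVal
    by_cases hr : p.1.toNat = r
    · subst hr
      by_cases hl : p.1.toNat < a.length
      · by_cases hc : p.2.toNat = c
        · subst hc
          have hga : a.getD p.1.toNat [] = a[p.1.toNat] := List.getD_eq_getElem a [] hl
          by_cases hcl : p.2.toNat < (a.getD p.1.toNat []).length
          · rw [hga] at hcl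
            simp [List.getD, List.getElem?_set, hl, hcl, hin, hga]
          · rw [hga] at hcl
            simp [List.getD, List.getElem?_set, hl, hcl, hin, hga,
              List.getElem?_eq_none (by omega : a[p.1.toNat].length ≤ p.2.toNat)]
        · simp [List.getD, List.getElem?_set, hl, hc, hin]
      · simp [List.getD, List.getElem?_set, hl, hin,
          List.getElem?_eq_none (by omega : a.length ≤ p.1.toNat)]
    · simp [List.getD, List.getElem?_set, hr]
  case isFalse h =>
    simp only [Bool.and_eq_true, Bool.not_eq_true', beq_eq_false_iff_ne, not_and, not_not] at h
    split
    case isTrue h2 =>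
      obtain ⟨hin, hr, hc, _, _⟩ := h2
      have := h hin
      unfold pvGet at this
      rw [hr, hc] at this
      simp [this]
    case isFalse => rfl

theorem pvStep_length (R C : Int) (a : List (List String)) (p : Int × Int) :
    (pvStep R C a p).length = a.length := by
  unfold pvStep pvSet; split <;> simp

theorem foldl_pvStep_val (R C : Int) (L : List (Int × Int)) (a : List (List String)) (r c : Nat) :
    pvVal (L.foldl (pvStep R C) a) r c =
      if (∃ p ∈ L, is_in_range p R C = true ∧ p.1.toNat = r ∧ p.2.toNat = c) ∧
          r < a.length ∧ c < (a.getD r []).length then "B"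
      else pvVal a r c := by
  induction L generalizing a with
  | nil => simp
  | cons p L ih =>
    rw [List.foldl_cons, ih (pvStep R C a p), pvStep_length, pvStep_row_length, pvStep_val]
    simp only [List.mem_cons, exists_eq_or_imp]
    rw [if_congr (show ((is_in_range p R C = true ∧ p.1.toNat = r ∧ p.2.toNat = c) ∨
          ∃ q ∈ L, is_in_range q R C = true ∧ q.1.toNat = r ∧ q.2.toNat = c) ∧
          r < a.length ∧ c < (a.getD r []).length ↔
        ((∃ q ∈ L, is_in_range q R C = true ∧ q.1.toNat = r ∧ q.2.toNat = c) ∧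
          r < a.length ∧ c < (a.getD r []).length) ∨
        (is_in_range p R C = true ∧ p.1.toNat = r ∧ p.2.toNat = c ∧
          r < a.length ∧ c < (a.getD r []).length) from by
        generalize (∃ q ∈ L, is_in_range q R C = true ∧ q.1.toNat = r ∧ q.2.toNat = c) = E
        tauto) rfl rfl, ite_or]

theorem mem_bunnyList (R C : Int) (m : List (List String)) (q : Int × Int) :
    q ∈ (PySem.List.pyRange 0 R 1).foldl (fun acc i =>
      (PySem.List.pyRange 0 C 1).foldl (fun acc2 j =>
        if pvGet m i j == "B" then acc2 ++ [(i, j)] else acc2) acc) ([] : List (Int × Int)) ↔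
    0 ≤ q.1 ∧ q.1 < R ∧ 0 ≤ q.2 ∧ q.2 < C ∧ pvGet m q.1 q.2 = "B" := by
  have hinner : ∀ (i : Int) (acc : List (Int × Int)),
      (PySem.List.pyRange 0 C 1).foldl (fun acc2 j =>
        if pvGet m i j == "B" then acc2 ++ [(i, j)] else acc2) acc =
      acc ++ ((PySem.List.pyRange 0 C 1).filter (fun j => pvGet m i j == "B")).map
        (fun j => (i, j)) := fun i acc =>
    PySem.List.foldl_append_if (fun j => pvGet m i j == "B") (fun j => (i, j)) _ acc
  simp only [hinner]
  rw [PySem.List.foldl_append_eq_flatMap]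
  simp only [List.nil_append, List.mem_flatMap, List.mem_map, List.mem_filter,
    PySem.List.mem_pyRange_one, beq_iff_eq]
  constructor
  · rintro ⟨i, ⟨hi0, hiR⟩, j, ⟨⟨hj0, hjC⟩, hB⟩, rfl⟩
    exact ⟨hi0, hiR, hj0, hjC, hB⟩
  · rintro ⟨h1, h2, h3, h4, h5⟩
    exact ⟨q.1, ⟨h1, h2⟩, q.2, ⟨⟨h3, h4⟩, h5⟩, rfl⟩

theorem cell_cond (R C : Int) (m : List (List String)) (BL : List (Int × Int))
    (hBL : ∀ q, q ∈ BL ↔ 0 ≤ q.1 ∧ q.1 < R ∧ 0 ≤ q.2 ∧ q.2 < C ∧ pvGet m q.1 q.2 = "B")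
    (r c : Nat) (ho : ¬ pvVal m r c = "B") :
    (∃ p ∈ BL.flatMap (fun b => pvExpandPositions b.1 b.2),
        is_in_range p R C = true ∧ p.1.toNat = r ∧ p.2.toNat = c) ↔
    ((decide ((r:Int) < R) && decide ((c:Int) < C) && pvHasBunny m R C r c) = true) := by
  have hg : pvGet m (r : Int) (c : Int) = pvVal m r c := by simp [pvGet]
  simp only [pvHasBunny, hg]
  rw [if_neg (by simp [ho] : ¬ (pvVal m r c == "B") = true)]
  simp only [Bool.and_eq_true, decide_eq_true_eq, List.any_cons, List.any_nil,
    Bool.or_eq_true, beq_iff_eq, Bool.false_eq_true, or_false, List.mem_flatMap]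
  constructor
  · rintro ⟨p, ⟨b, hb, hp⟩, hinr, h1, h2⟩
    rw [hBL] at hb
    obtain ⟨hb1, hb2, hb3, hb4, hbB⟩ := hb
    simp only [is_in_range, Bool.and_eq_true, decide_eq_true_eq] at hinr
    obtain ⟨⟨hp1, hp2⟩, hp3, hp4⟩ := hinr
    simp only [pvExpandPositions, List.mem_cons, List.not_mem_nil, or_false] at hp
    rcases hp with hp | hp | hp | hp <;>
      (have e1 : p.1 = _ := congrArg Prod.fst hp
       have e2 : p.2 = _ := congrArg Prod.snd hp
       simp only at e1 e2) <;>
      refine ⟨⟨by omega, by omega⟩, ?_⟩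
    · exact Or.inr (Or.inl ⟨⟨⟨by omega, by omega⟩, by omega, by omega⟩, by
        rw [show ((r:Int) - 1) = b.1 by omega, show ((c:Int)) = b.2 by omega]; exact hbB⟩)
    · exact Or.inl ⟨⟨⟨by omega, by omega⟩, by omega, by omega⟩, by
        rw [show ((r:Int) + 1) = b.1 by omega, show ((c:Int)) = b.2 by omega]; exact hbB⟩
    · exact Or.inr (Or.inr (Or.inr ⟨⟨⟨by omega, by omega⟩, by omega, by omega⟩, by
        rw [show ((r:Int)) = b.1 by omega, show ((c:Int) - 1) = b.2 by omega]; exact hbB⟩))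
    · exact Or.inr (Or.inr (Or.inl ⟨⟨⟨by omega, by omega⟩, by omega, by omega⟩, by
        rw [show ((r:Int)) = b.1 by omega, show ((c:Int) + 1) = b.2 by omega]; exact hbB⟩))
  · rintro ⟨⟨hrR, hcC⟩, hcase⟩
    have hrange : is_in_range ((r : Int), (c : Int)) R C = true := by
      simp [is_in_range]; omega
    rcases hcase with ⟨⟨⟨h1, h2⟩, h3, h4⟩, hB⟩ | ⟨⟨⟨h1, h2⟩, h3, h4⟩, hB⟩ |
      ⟨⟨⟨h1, h2⟩, h3, h4⟩, hB⟩ | ⟨⟨⟨h1, h2⟩, h3, h4⟩, hB⟩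
    · exact ⟨((r : Int), (c : Int)),
        ⟨((r : Int) + 1, (c : Int)), (hBL _).2 ⟨by omega, by omega, by omega, by omega, hB⟩,
          by simp [pvExpandPositions]⟩, hrange, by simp, by simp⟩
    · exact ⟨((r : Int), (c : Int)),
        ⟨((r : Int) - 1, (c : Int)), (hBL _).2 ⟨by omega, by omega, by omega, by omega, hB⟩,
          by simp [pvExpandPositions]⟩, hrange, by simp, by simp⟩
    · exact ⟨((r : Int), (c : Int)),
        ⟨((r : Int), (c : Int) + 1), (hBL _).2 ⟨by omega, by omega, by omega, by omega, hB⟩,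
          by simp [pvExpandPositions]⟩, hrange, by simp, by simp⟩
    · exact ⟨((r : Int), (c : Int)),
        ⟨((r : Int), (c : Int) - 1), (hBL _).2 ⟨by omega, by omega, by omega, by omega, hB⟩,
          by simp [pvExpandPositions]⟩, hrange, by simp, by simp⟩

theorem foldl_foldl_eq_foldl_flatMap {α β γ : Type} (g : α → List β) (f : γ → β → γ)
    (L : List α) (init : γ) :
    L.foldl (fun acc x => (g x).foldl f acc) init = (L.flatMap g).foldl f init := by
  induction L generalizing init with
  | nil => rfl
  | cons x L ih => simp [List.foldl_cons, List.flatMap_cons, List.foldl_append, ih]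

theorem foldl_pvStep_length (R C : Int) (L : List (Int × Int)) (a : List (List String)) :
    (L.foldl (pvStep R C) a).length = a.length := by
  induction L generalizing a with
  | nil => rfl
  | cons p L ih => rw [List.foldl_cons, ih, pvStep_length]

theorem foldl_pvStep_row_length (R C : Int) (L : List (Int × Int)) (a : List (List String)) (r : Nat) :
    ((L.foldl (pvStep R C) a).getD r []).length = (a.getD r []).length := by
  induction L generalizing a with
  | nil => rfl
  | cons p L ih => rw [List.foldl_cons, ih, pvStep_row_length]

theorem ports_eq (R C : Int) (m : List (List String)) :
    find_bunnies R C m = find_bunnies_alt R C m := by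
  have hA : find_bunnies R C m =
      (((PySem.List.pyRange 0 R 1).foldl (fun acc i =>
          (PySem.List.pyRange 0 C 1).foldl (fun acc2 j =>
            if pvGet m i j == "B" then acc2 ++ [(i, j)] else acc2) acc) []).flatMap
        (fun b => pvExpandPositions b.1 b.2)).foldl (pvStep R C) m :=
    foldl_foldl_eq_foldl_flatMap _ _ _ _
  rw [hA]
  set BL : List (Int × Int) := (PySem.List.pyRange 0 R 1).foldl (fun acc i =>
      (PySem.List.pyRange 0 C 1).foldl (fun acc2 j =>
        if pvGet m i j == "B" then acc2 ++ [(i, j)] else acc2) acc) [] with hBLdef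
  set F := (BL.flatMap (fun b => pvExpandPositions b.1 b.2)).foldl (pvStep R C) m with hF
  have hFlen : F.length = m.length := by rw [hF, foldl_pvStep_length]
  simp only [find_bunnies_alt]
  apply List.ext_getElem
  · rw [hFlen, List.length_mapIdx]
  · intro r h1 h2
    have hm : r < m.length := by rw [← hFlen]; exact h1
    have hrowlen : (F.getD r []).length = (m.getD r []).length := by
      rw [hF, foldl_pvStep_row_length]
    rw [List.getElem_mapIdx]
    apply List.ext_getElem
    · rw [← List.getD_eq_getElem F [] h1, hrowlen, List.length_mapIdx,
        List.getD_eq_getElem m [] hm]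
    · intro c hc1 hc2
      have hcm : c < (m.getD r []).length := by
        rw [← hrowlen, List.getD_eq_getElem F [] h1]; exact hc1
      have hcm' : c < m[r].length := by rwa [← List.getD_eq_getElem m [] hm]
      have hmrc : m[r][c] = pvVal m r c := by
        rw [pvVal, List.getD_eq_getElem m [] hm]
        exact (List.getD_eq_getElem _ _ (by rwa [List.getD_eq_getElem m [] hm] at hcm)).symm
      have hFrc : F[r][c] = pvVal F r c := by
        rw [pvVal, List.getD_eq_getElem F [] h1]
        exact (List.getD_eq_getElem _ _ hc1).symm
      rw [List.getElem_mapIdx, hFrc, hF, foldl_pvStep_val, hmrc]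
      by_cases ho : pvVal m r c = "B"
      · have hguard : (decide ((r:Int) < R) && decide ((c:Int) < C) &&
            pvHasBunny m R C (r : Int) (c : Int)) = true →
            (if (decide ((r:Int) < R) && decide ((c:Int) < C) &&
              pvHasBunny m R C (r : Int) (c : Int)) = true then "B" else pvVal m r c) = "B" := by
          intro h; rw [if_pos h]
        split_ifs <;> simp [ho]
      · rw [if_congr (show (∃ p ∈ BL.flatMap (fun b => pvExpandPositions b.1 b.2),
            is_in_range p R C = true ∧ p.1.toNat = r ∧ p.2.toNat = c) ∧
            r < m.length ∧ c < (m.getD r []).length ↔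
            (decide ((r:Int) < R) && decide ((c:Int) < C) &&
              pvHasBunny m R C (r : Int) (c : Int)) = true from by
          rw [← cell_cond R C m BL (fun q => by rw [hBLdef, mem_bunnyList]) r c ho]
          simp only [hm, hcm, and_true]) rfl rfl]

-- ===== VERDICT (by name: the statement is the Claim_ definition above) =====
theorem find_bunnies_spec : Claim_equal_find_bunnies := by
  intro row_received col_received changed_matrix _ _
  unfold Spec_find_bunnies
  exact ports_eq row_received col_received changed_matrix
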